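-- pv_equiv track=rewrite | github.com/kaisAlbi/Kais-Albichari-Master-Thesis-2018-2019 | StateSimulation/SimplifiedEstimatePayoffs.py | displayStrat
-- ===== SOURCE A (Python) =====
-- def displayStrat(strat):
--     """
--     Transforms a binary strategy array into a human readable strategy array
--     :param strat: strategy array
--     :return: human readable strategy array
--     """
--     displayable_strat = []
--     for i in range (len(strat)):
--         if strat[i] == 1:
--             if i < 2:
--                 displayable_strat.append("L")
--             else:
--                 displayable_strat.append("C")
--         else:
--             if i < 2:
--                 displayable_strat.append("R")
--             else:
--                 displayable_strat.append("D")
--     return displayable_strat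
-- ===== SOURCE B (Python) =====
-- def displayStrat(strat):
--     """
--     Transforms a binary strategy array into a human readable strategy array
--     :param strat: strategy array
--     :return: human readable strategy array
--     """
--     tables = [("L", "R"), ("L", "R")] + [("C", "D")] * max(len(strat) - 2, 0)
--     return [yes if v == 1 else no for v, (yes, no) in zip(strat, tables)]
-- ===== Notes on version B (the rewrite author's own statement) =====
-- stated objective: alternative
-- what changed: Replaces A's per-index i<2 branching loop by a table-driven pass: precompute a list of (label-if-1, label-otherwise) pairs aligned with the positions, zip it with the strategy, and select by value only.
import Mathlib
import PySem

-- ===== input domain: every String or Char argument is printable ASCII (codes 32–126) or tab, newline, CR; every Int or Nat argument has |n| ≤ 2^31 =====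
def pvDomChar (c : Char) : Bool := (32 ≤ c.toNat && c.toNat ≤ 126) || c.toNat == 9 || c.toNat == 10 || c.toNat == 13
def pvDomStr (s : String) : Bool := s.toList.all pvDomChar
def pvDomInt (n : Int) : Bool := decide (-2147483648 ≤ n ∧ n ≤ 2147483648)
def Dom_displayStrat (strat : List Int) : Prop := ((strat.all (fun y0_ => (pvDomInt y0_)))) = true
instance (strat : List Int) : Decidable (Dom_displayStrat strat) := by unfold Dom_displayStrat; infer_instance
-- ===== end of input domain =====

-- B replaces A's per-index i<2 branching loop by a table-driven pass: a precomputed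
-- list of (label-if-1, label-otherwise) pairs is zipped with the strategy and the
-- label is selected by value only; objective: alternative (same cost, no index tests).

-- ===== PORT A =====
def displayStrat (strat : List Int) : List String :=
  (PySem.List.pyRange 0 (strat.length : Int) 1).foldl
    (fun acc i =>
      if PySem.List.pyGetD strat i 0 = 1 then
        (if i < 2 then acc ++ ["L"] else acc ++ ["C"])
      else
        (if i < 2 then acc ++ ["R"] else acc ++ ["D"])) []

-- ===== PORT B =====
def displayStrat_alt (strat : List Int) : List String :=
  let tables := [("L", "R"), ("L", "R")] ++ List.replicate (strat.length - 2) ("C", "D")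
  (strat.zip tables).map (fun p => if p.1 = 1 then p.2.1 else p.2.2)

-- ===== PRECONDITION & SPEC =====
def Spec_displayStrat (strat : List Int) (out : List String) : Prop := out = displayStrat_alt strat
instance (strat : List Int) (out : List String) : Decidable (Spec_displayStrat strat out) := by unfold Spec_displayStrat; infer_instance

-- ===== CLAIM (what is proved, stated in full; the proofs are below) =====
def Claim_equal_displayStrat : Prop := ∀ (strat : List Int), Dom_displayStrat strat → Spec_displayStrat strat (displayStrat strat)

-- ===== LEMMAS AND PROOFS =====

-- A's loop, written as a map over the index range
theorem displayStrat_eq_map (strat : List Int) :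
    displayStrat strat = (List.range strat.length).map (fun k =>
      if strat.getD k 0 = 1 then (if (k : Int) < 2 then "L" else "C")
      else (if (k : Int) < 2 then "R" else "D")) := by
  unfold displayStrat
  rw [show (fun (acc : List String) (i : Int) =>
      if PySem.List.pyGetD strat i 0 = 1 then
        (if i < 2 then acc ++ ["L"] else acc ++ ["C"])
      else
        (if i < 2 then acc ++ ["R"] else acc ++ ["D"])) =
      (fun acc i => acc ++ [if PySem.List.pyGetD strat i 0 = 1 then
        (if i < 2 then "L" else "C") else (if i < 2 then "R" else "D")]) by
    funext acc i; split_ifs <;> rfl]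
  rw [PySem.List.foldl_append_singleton_eq_map, PySem.List.pyRange_one]
  simp [List.map_map, Function.comp_def]

-- turning an index-range map into a direct map over the list
theorem map_getD_range (xs : List Int) (g : Int → String) :
    (List.range xs.length).map (fun k => g (xs.getD k 0)) = xs.map g := by
  induction xs with
  | nil => rfl
  | cons x t ih =>
    simp only [List.length_cons, List.range_succ_eq_map, List.map_cons, List.map_map]
    exact congrArg _ ih

-- zipping a list with a same-length constant table is a plain map
theorem zip_replicate_map (t : List Int) (p : String × String) :
    (t.zip (List.replicate t.length p)).map (fun q => if q.1 = 1 then q.2.1 else q.2.2)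
      = t.map (fun v => if v = 1 then p.1 else p.2) := by
  induction t with
  | nil => rfl
  | cons x s ih => simpa [List.replicate_succ] using ih

-- A's result on a list of length ≥ 2, in closed form
theorem displayStrat_cons2 (a b : Int) (t : List Int) :
    displayStrat (a :: b :: t) =
      (if a = 1 then "L" else "R") :: (if b = 1 then "L" else "R")
        :: t.map (fun v => if v = 1 then "C" else "D") := by
  rw [displayStrat_eq_map]
  have h2 : (a :: b :: t).length = 2 + t.length := by simp; omega
  rw [h2, List.range_add, List.map_append, List.map_map]
  rw [show List.range 2 = [0, 1] from rfl]
  simp only [List.map_cons, List.map_nil, List.cons_append, List.nil_append]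
  congr 1
  congr 1
  refine Eq.trans (List.map_congr_left ?_) (map_getD_range t (fun v => if v = 1 then "C" else "D"))
  intro k hk
  have h1 : ¬ (2 + k ≤ 1) := by omega
  have h2k : (a :: b :: t)[2 + k]? = t[k]? := by rw [Nat.add_comm]; simp
  simp [Function.comp_apply, List.getD, h2k, h1]

-- ===== VERDICT (by name: the statement is the Claim_ definition above) =====
theorem displayStrat_spec : Claim_equal_displayStrat := by
  intro strat _
  show displayStrat strat = displayStrat_alt strat
  match strat with
  | [] => rfl
  | [a] => simp [displayStrat_eq_map, displayStrat_alt, List.getD]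
  | a :: b :: t =>
    rw [displayStrat_cons2]
    unfold displayStrat_alt
    rw [show (a :: b :: t).length - 2 = t.length from by simp]
    simp only [List.cons_append, List.nil_append, List.zip_cons_cons, List.map_cons]
    rw [zip_replicate_map]
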